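-- pv_equiv track=rewrite | github.com/BenderFendor/Thesis | backend/app/services/source_url_guard.py | _host_family
-- ===== SOURCE A (Python) =====
-- from typing import Any, Optional
--
-- _HOST_FAMILIES = {
--     "bbc": ("bbc.com", "bbc.co.uk", "bbci.co.uk"),
-- }
--
-- def normalize_host(host: str) -> str:
--     return host.strip().lower().replace("www.", "")
--
-- def _host_family(host: str) -> Optional[str]:
--     normalized = normalize_host(host)
--     for family, members in _HOST_FAMILIES.items():
--         if any(
--             normalized == member or normalized.endswith(f".{member}")
--             for member in members
--         ):
--             return family
--     return None
-- ===== SOURCE B (Python) =====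
-- from typing import Any, Optional
--
-- _HOST_FAMILIES = {
--     "bbc": ("bbc.com", "bbc.co.uk", "bbci.co.uk"),
-- }
--
-- # flat lookup table: member suffix -> family name
-- _SUFFIX_FAMILY = {
--     member: family
--     for family, members in _HOST_FAMILIES.items()
--     for member in members
-- }
--
-- def normalize_host(host: str) -> str:
--     return host.strip().lower().replace("www.", "")
--
-- def _host_family(host: str) -> Optional[str]:
--     rest = normalize_host(host)
--     at_boundary = True
--     while rest:
--         if at_boundary:
--             family = _SUFFIX_FAMILY.get(rest)
--             if family is not None:
--                 return family
--         at_boundary = rest[0] == "."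
--         rest = rest[1:]
--     return None
-- ===== Notes on version B (the rewrite author's own statement) =====
-- stated objective: alternative
-- what changed: Replaces A's scan over the config's member suffixes with endswith tests by a single left-to-right walk over the normalized host that looks up each dot-boundary suffix in a precomputed member->family dict.
import Mathlib
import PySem

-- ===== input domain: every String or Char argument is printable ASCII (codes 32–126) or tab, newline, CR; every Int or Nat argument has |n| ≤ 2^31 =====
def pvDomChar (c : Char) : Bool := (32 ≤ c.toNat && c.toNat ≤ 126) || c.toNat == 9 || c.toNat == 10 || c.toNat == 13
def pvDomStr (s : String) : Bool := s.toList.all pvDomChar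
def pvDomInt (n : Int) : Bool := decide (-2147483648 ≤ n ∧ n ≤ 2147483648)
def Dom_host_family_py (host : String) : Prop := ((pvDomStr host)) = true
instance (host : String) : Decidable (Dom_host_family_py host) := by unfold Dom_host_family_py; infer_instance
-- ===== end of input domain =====

-- B replaces A's scan over config members with endswith by a single walk over the host's own
-- dot boundaries doing O(1) lookups in a precomputed suffix->family table (objective: alternative).

-- ===== PORT A =====
def pvHostFamilies : List (String × List String) :=
  [("bbc", ["bbc.com", "bbc.co.uk", "bbci.co.uk"])]

def pvNormalizeHost (host : String) : String :=
  PySem.Str.replace (PySem.Str.lower (PySem.Str.strip host)) "www." ""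

def pvFamLoop (normalized : String) : List (String × List String) → Option String
  | [] => none
  | (family, members) :: rest =>
    if members.any (fun m => normalized == m || PySem.Str.endswith normalized ("." ++ m)) then
      some family
    else pvFamLoop normalized rest

def host_family_py (host : String) : Option String :=
  pvFamLoop (pvNormalizeHost host) pvHostFamilies

-- ===== PORT B =====
-- the dict comprehension building _SUFFIX_FAMILY
def pvSuffixFamily : PySem.Dict String String :=
  pvHostFamilies.foldl (fun d fm => fm.2.foldl (fun d m => d.insert m fm.1) d) PySem.Dict.empty

-- the 'while rest' loop of B: walk the suffixes of the normalized host, looking up those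
-- that start at a label boundary
def pvAltWalk : Bool → List Char → Option String
  | _, [] => none
  | atBoundary, c :: rest =>
    match (if atBoundary then pvSuffixFamily.get? (String.ofList (c :: rest)) else none) with
    | some family => some family
    | none => pvAltWalk (c == '.') rest

def host_family_py_alt (host : String) : Option String :=
  pvAltWalk true (pvNormalizeHost host).toList

-- ===== PRECONDITION & SPEC =====
def Spec_host_family_py (host : String) (out : Option String) : Prop := out = host_family_py_alt host
instance (host : String) (out : Option String) : Decidable (Spec_host_family_py host out) := by unfold Spec_host_family_py; infer_instance

-- ===== CLAIM (what is proved, stated in full; the proofs are below) =====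
def Claim_equal_host_family_py : Prop := ∀ (host : String), Dom_host_family_py host → Spec_host_family_py host (host_family_py host)

-- ===== LEMMAS AND PROOFS =====

-- cs is one of the member suffixes (char-list form)
def pvMembB (cs : List Char) : Bool :=
  cs == "bbc.com".toList || cs == "bbc.co.uk".toList || cs == "bbci.co.uk".toList

-- some proper suffix of cs starting right after a '.' is a member
def pvHds : List Char → Bool
  | [] => false
  | c :: rest => (c == '.' && pvMembB rest) || pvHds rest

theorem pvOfList_eq_iff (cs : List Char) (s : String) :
    String.ofList cs = s ↔ cs = s.toList := by
  constructor
  · intro h; have := congrArg String.toList h; simpa using this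
  · intro h; subst h; simp

theorem pvMembB_iff (cs : List Char) :
    pvMembB cs = true ↔
      (cs = "bbc.com".toList ∨ cs = "bbc.co.uk".toList ∨ cs = "bbci.co.uk".toList) := by
  simp [pvMembB, or_assoc]

theorem pvBeq_ofList (cs : List Char) (s : String) :
    (s == String.ofList cs) = (cs == s.toList) := by
  by_cases hx : cs = s.toList
  · simp [hx]
  · have h1 : ¬ s = String.ofList cs := fun e => hx ((pvOfList_eq_iff cs s).mp e.symm)
    simp [hx, h1]

theorem pvLook_eq (cs : List Char) :
    pvSuffixFamily.get? (String.ofList cs) = if pvMembB cs then some "bbc" else none := by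
  have h : pvSuffixFamily =
      PySem.Dict.mk [("bbc.com", "bbc"), ("bbc.co.uk", "bbc"), ("bbci.co.uk", "bbc")] := by decide
  rw [h]
  simp only [PySem.Dict.get?, List.find?, pvBeq_ofList, pvMembB]
  rcases Bool.eq_false_or_eq_true (cs == ['b','b','c','.','c','o','m']) with hc1 | hc1 <;>
    rcases Bool.eq_false_or_eq_true (cs == ['b','b','c','.','c','o','.','u','k']) with hc2 | hc2 <;>
      rcases Bool.eq_false_or_eq_true (cs == ['b','b','c','i','.','c','o','.','u','k']) with hc3 | hc3 <;>
        simp [hc1, hc2, hc3]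

theorem pvWalk_eq (cs : List Char) : ∀ b,
    pvAltWalk b cs = if (b && pvMembB cs) || pvHds cs then some "bbc" else none := by
  induction cs with
  | nil => intro b; simp [pvAltWalk, pvMembB, pvHds]
  | cons c rest ih =>
    intro b
    cases b with
    | false => simp [pvAltWalk, pvHds, ih]
    | true =>
      simp only [pvAltWalk, if_pos trivial, pvLook_eq]
      by_cases hm : pvMembB (c :: rest)
      · simp [hm]
      · simp only [Bool.not_eq_true] at hm
        simp [hm, ih, pvHds]

theorem pvHds_iff (cs : List Char) :
    pvHds cs = true ↔ ∃ rest, pvMembB rest = true ∧ ('.' :: rest) <:+ cs := by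
  induction cs with
  | nil => simp [pvHds]
  | cons c t ih =>
    simp only [pvHds, Bool.or_eq_true, Bool.and_eq_true, beq_iff_eq, ih]
    constructor
    · rintro (⟨rfl, hm⟩ | ⟨r, hm, hs⟩)
      · exact ⟨t, hm, List.suffix_refl _⟩
      · exact ⟨r, hm, hs.trans (List.suffix_cons c t)⟩
    · rintro ⟨r, hm, hs⟩
      rcases List.suffix_cons_iff.mp hs with h | h
      · obtain ⟨h1, h2⟩ := List.cons_eq_cons.mp h.symm
        left; exact ⟨h1, h2 ▸ hm⟩
      · right; exact ⟨r, hm, h⟩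

theorem pvStrBeq_iff (n m : String) : (n == m) = true ↔ n.toList = m.toList := by
  constructor
  · intro h; exact congrArg String.toList (beq_iff_eq.mp h)
  · intro h
    exact beq_iff_eq.mpr (by have := congrArg String.ofList h; simpa using this)

theorem pvEndswith_iff (n m : String) :
    PySem.Str.endswith n ("." ++ m) = true ↔ ('.' :: m.toList) <:+ n.toList := by
  rw [show PySem.Str.endswith n ("." ++ m) = PySem.Chars.endswith n.toList ("." ++ m).toList from by
    simp]
  rw [PySem.Chars.endswith_iff]
  simp

theorem pvCond_eq (n : String) :
    (["bbc.com", "bbc.co.uk", "bbci.co.uk"].any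
        (fun m => n == m || PySem.Str.endswith n ("." ++ m)))
      = ((true && pvMembB n.toList) || pvHds n.toList) := by
  rw [Bool.eq_iff_iff]
  simp only [List.any_cons, List.any_nil, Bool.or_eq_true, Bool.or_false, Bool.true_and,
    pvStrBeq_iff, pvEndswith_iff, pvMembB_iff, pvHds_iff]
  constructor
  · rintro ((h | h) | (h | h) | (h | h))
    · exact Or.inl (Or.inl h)
    · exact Or.inr ⟨"bbc.com".toList, Or.inl rfl, h⟩
    · exact Or.inl (Or.inr (Or.inl h))
    · exact Or.inr ⟨"bbc.co.uk".toList, Or.inr (Or.inl rfl), h⟩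
    · exact Or.inl (Or.inr (Or.inr h))
    · exact Or.inr ⟨"bbci.co.uk".toList, Or.inr (Or.inr rfl), h⟩
  · rintro ((h | h | h) | ⟨r, (rfl | rfl | rfl), hs⟩)
    · exact Or.inl (Or.inl h)
    · exact Or.inr (Or.inl (Or.inl h))
    · exact Or.inr (Or.inr (Or.inl h))
    · exact Or.inl (Or.inr hs)
    · exact Or.inr (Or.inl (Or.inr hs))
    · exact Or.inr (Or.inr (Or.inr hs))

-- ===== VERDICT (by name: the statement is the Claim_ definition above) =====
theorem host_family_py_spec : Claim_equal_host_family_py := by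
  intro host _
  unfold Spec_host_family_py host_family_py host_family_py_alt
  set n := pvNormalizeHost host with hn
  rw [pvWalk_eq n.toList true]
  simp only [pvHostFamilies, pvFamLoop, pvCond_eq n]
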